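-- pv_equiv track=rewrite | github.com/blegloannec/CodeProblems | CodeJam/20/20.1A.B.Pascal_Walk.py | sqrt_walk
-- ===== SOURCE A (Python) =====
-- def sqrt_walk(N):
--     assert N>0
--     N -= 1
--     W = [(1,1)]
--     k = 1
--     while N>=k:  # second column
--         W.append((k+1,2))
--         N -= k
--         k += 1
--     while N>0:  # first column
--         W.append((k,1))
--         N -= 1
--         k += 1
--     return W
-- ===== SOURCE B (Python) =====
-- import math
--
-- def sqrt_walk(N):
--     assert N > 0
--     n = N - 1
--     s = math.isqrt(8 * n + 1)
--     m = (s - 1) // 2            # largest m with m*(m+1)//2 <= n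
--     r = n - m * (m + 1) // 2    # 0 <= r <= m
--     return ([(1, 1)]
--             + [(k + 1, 2) for k in range(1, m + 1)]
--             + [(m + 1 + j, 1) for j in range(r)])
-- ===== Notes on version B (the rewrite author's own statement) =====
-- stated objective: simpler
-- what changed: Replaces A's two greedy subtraction while-loops by a closed-form computation of the cutoff m via math.isqrt (the number of full second-column steps, i.e. the largest triangular number fitting in the remaining sum) and builds the walk directly as a list of ranges.
import Mathlib
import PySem

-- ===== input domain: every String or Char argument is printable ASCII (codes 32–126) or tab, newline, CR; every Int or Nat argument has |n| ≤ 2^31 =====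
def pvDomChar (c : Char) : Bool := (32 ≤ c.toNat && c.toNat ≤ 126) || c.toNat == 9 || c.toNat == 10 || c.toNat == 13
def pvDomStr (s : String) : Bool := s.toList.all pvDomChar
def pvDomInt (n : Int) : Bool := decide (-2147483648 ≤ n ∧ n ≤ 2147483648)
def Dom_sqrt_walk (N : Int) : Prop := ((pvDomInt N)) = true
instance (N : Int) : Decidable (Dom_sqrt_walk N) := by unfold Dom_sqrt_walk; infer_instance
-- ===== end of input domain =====

-- B replaces A's two greedy subtraction loops by a closed-form index m = isqrt-based largest
-- triangular number ≤ N-1 and builds the walk directly from ranges (objective: simpler).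

-- ===== PORT A =====
-- second while loop of A: while N>0: append (k,1); N-=1; k+=1
-- (fuel only makes the recursion total; with fuel ≥ N.toNat it is exactly A's loop)
def sqrtWalkLoop2 : Nat → Int → Int → List (Int × Int)
  | 0, _, _ => []
  | fuel+1, N, k => if N > 0 then (k, 1) :: sqrtWalkLoop2 fuel (N-1) (k+1) else []

-- first while loop of A: while N>=k: append (k+1,2); N-=k; k+=1, then falls through to loop2
def sqrtWalkLoop1 : Nat → Int → Int → List (Int × Int)
  | 0, _, _ => []
  | fuel+1, N, k =>
      if N ≥ k then (k+1, 2) :: sqrtWalkLoop1 fuel (N-k) (k+1)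
      else sqrtWalkLoop2 (fuel+1) N k

def sqrt_walk (N : Int) : List (Int × Int) :=
  -- the assert: non-positive N raises AssertionError and is excluded by Pre_sqrt_walk
  (1, 1) :: sqrtWalkLoop1 ((N-1).toNat + 1) (N-1) 1

-- ===== PORT B =====
def sqrt_walk_alt (N : Int) : List (Int × Int) :=
  let n := N - 1
  -- math.isqrt on a nonnegative int = Nat.sqrt (exact on Pre_, where 8*n+1 ≥ 1)
  let s : Int := (Nat.sqrt ((8*n + 1).toNat) : Int)
  let m := PySem.Int.floordiv (s - 1) 2
  let r := n - PySem.Int.floordiv (m * (m + 1)) 2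
  [((1 : Int), (1 : Int))]
    ++ (PySem.List.pyRange 1 (m+1) 1).map (fun k => (k + 1, 2))
    ++ (PySem.List.pyRange 0 r 1).map (fun j => (m + 1 + j, 1))

-- ===== PRECONDITION & SPEC =====
-- A's assert raises AssertionError on non-positive N; exactly those inputs are excluded.
def Pre_sqrt_walk (N : Int) : Prop := 1 ≤ N
instance (N : Int) : Decidable (Pre_sqrt_walk N) := by unfold Pre_sqrt_walk; infer_instance
def pvWitness_sqrt_walk : Int := 8

def Spec_sqrt_walk (N : Int) (out : List (Int × Int)) : Prop := out = sqrt_walk_alt N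
instance (N : Int) (out : List (Int × Int)) : Decidable (Spec_sqrt_walk N out) := by unfold Spec_sqrt_walk; infer_instance

-- ===== CLAIM (what is proved, stated in full; the proofs are below) =====
def Claim_equal_sqrt_walk : Prop := ∀ (N : Int), Dom_sqrt_walk N → Pre_sqrt_walk N → Spec_sqrt_walk N (sqrt_walk N)

-- ===== LEMMAS AND PROOFS =====

-- loop2 unrolled: with enough fuel it is the ascending run of (k+j, 1), j < n.toNat
theorem sqrtWalkLoop2_eq (c : Nat) : ∀ (fuel : Nat) (n k : Int), n.toNat = c → c ≤ fuel →
    sqrtWalkLoop2 fuel n k = (List.range c).map (fun j : Nat => (k + (j : Int), (1 : Int))) := by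
  induction c with
  | zero =>
      intro fuel n k hc _
      cases fuel with
      | zero => simp [sqrtWalkLoop2]
      | succ f =>
          have h : ¬ (n > 0) := by omega
          rw [sqrtWalkLoop2, if_neg h]; simp
  | succ c ih =>
      intro fuel n k hc hf
      cases fuel with
      | zero => omega
      | succ f =>
          have hn : n > 0 := by omega
          have h1 : (n-1).toNat = c := by omega
          rw [sqrtWalkLoop2, if_pos hn, ih f (n-1) (k+1) h1 (by omega)]
          rw [List.range_succ_eq_map, List.map_cons, List.map_map]
          congr 1
          · simp
          · apply List.map_congr_left
            intro a _
            simp [Function.comp]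
            ring

-- loop1 unrolled: if T = k + (k+1) + … + (k+m-1) fits in n but one more step does not,
-- loop1 does exactly m second-column steps then hands n - T to loop2
theorem sqrtWalkLoop1_eq (m : Nat) : ∀ (fuel : Nat) (n k T : Int),
    1 ≤ k → 2 * T = 2 * m * k + m * ((m : Int) - 1) → T ≤ n → n - T < k + m →
    m + (n - T).toNat + 1 ≤ fuel →
    sqrtWalkLoop1 fuel n k =
      (List.range m).map (fun i : Nat => (k + 1 + (i : Int), (2 : Int)))
        ++ sqrtWalkLoop2 fuel (n - T) (k + m) := by
  induction m with
  | zero =>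
      intro fuel n k T hk hT hTn hlt hf
      have hT0 : T = 0 := by push_cast at hT; omega
      cases fuel with
      | zero => omega
      | succ f =>
          have h : ¬ (n ≥ k) := by push_cast at hlt; omega
          rw [sqrtWalkLoop1, if_neg h]
          simp [hT0]
  | succ m ih =>
      intro fuel n k T hk hT hTn hlt hf
      cases fuel with
      | zero => omega
      | succ f =>
          have hTk : (k : Int) ≤ T := by push_cast at hT; nlinarith
          have hnk : n ≥ k := by omega
          rw [sqrtWalkLoop1, if_pos hnk]
          have hT' : 2 * (T - k) = 2 * (m : Int) * (k+1) + m * ((m : Int) - 1) := by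
            push_cast at hT; linear_combination hT
          have heq : n - k - (T - k) = n - T := by ring
          rw [ih f (n-k) (k+1) (T-k) (by omega) hT' (by omega) (by push_cast at hlt; omega) (by omega), heq]
          have hfuel2 : sqrtWalkLoop2 f (n - T) (k + 1 + m) = sqrtWalkLoop2 (f+1) (n - T) (k + 1 + m) := by
            rw [sqrtWalkLoop2_eq (n-T).toNat f (n-T) (k+1+m) rfl (by omega),
                sqrtWalkLoop2_eq (n-T).toNat (f+1) (n-T) (k+1+m) rfl (by omega)]
          rw [hfuel2]
          rw [List.range_succ_eq_map, List.map_cons, List.map_map]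
          simp only [List.cons_append]
          congr 1
          · simp
          congr 1
          · apply List.map_congr_left
            intro a _
            simp [Function.comp]
            ring
          · congr 1
            push_cast
            ring

-- the isqrt formula computes exactly the greedy cutoff m: T m ≤ n < T (m+1)
theorem isqrt_m_spec (nn : Nat) :
    (Nat.sqrt (8*nn + 1) - 1) / 2 * ((Nat.sqrt (8*nn + 1) - 1) / 2 + 1) ≤ 2 * nn ∧
    2 * nn < ((Nat.sqrt (8*nn + 1) - 1) / 2 + 1) * ((Nat.sqrt (8*nn + 1) - 1) / 2 + 2) := by
  set s := Nat.sqrt (8*nn + 1) with hs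
  set m := (s - 1) / 2 with hm
  have hs1 : s ^ 2 ≤ 8*nn + 1 := Nat.sqrt_le' (8*nn+1)
  have hs2 : 8*nn + 1 < (s+1) ^ 2 := Nat.lt_succ_sqrt' (8*nn+1)
  have hspos : 1 ≤ s := by nlinarith
  have hm1 : 2*m + 1 ≤ s := by omega
  have hm2 : s ≤ 2*m + 2 := by omega
  constructor
  · nlinarith
  · nlinarith

theorem sqrt_walk_eq (N : Int) (hN : 1 ≤ N) : sqrt_walk N = sqrt_walk_alt N := by
  unfold sqrt_walk sqrt_walk_alt
  dsimp only
  set n : Int := N - 1 with hn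
  have hn0 : 0 ≤ n := by omega
  set nn : Nat := n.toNat with hnn
  have hncast : (nn : Int) = n := by omega
  have h8 : (8*n + 1).toNat = 8*nn + 1 := by omega
  rw [h8]
  obtain ⟨hml, hmr⟩ := isqrt_m_spec nn
  set s : Nat := Nat.sqrt (8*nn + 1) with hs
  set m : Nat := (s - 1) / 2 with hm
  set P : Nat := m * (m + 1) with hP
  have hPexp : (m+1) * (m+2) = P + 2*m + 2 := by rw [hP]; ring
  have hPeven : P % 2 = 0 := by
    rcases Nat.even_mul_succ_self m with ⟨t, ht⟩
    omega
  have hspos : 1 ≤ s := by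
    have hs2 : 8*nn + 1 < (s+1) ^ 2 := Nat.lt_succ_sqrt' (8*nn+1)
    nlinarith
  -- B's int computations
  have hmInt : PySem.Int.floordiv ((s : Int) - 1) 2 = (m : Int) := by
    rw [PySem.Int.floordiv, Int.fdiv_eq_ediv]
    omega
  have hTInt : PySem.Int.floordiv ((m : Int) * ((m : Int) + 1)) 2 = ((P / 2 : Nat) : Int) := by
    rw [PySem.Int.floordiv, Int.fdiv_eq_ediv]
    have h1 : (m : Int) * ((m : Int) + 1) = ((P : Nat) : Int) := by rw [hP]; push_cast; ring
    rw [h1]; omega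
  set T : Int := ((P / 2 : Nat) : Int) with hT
  have h2T : 2 * T = (m : Int) * ((m : Int) + 1) := by
    have hp2 : 2 * (P / 2) = P := by omega
    calc 2 * T = ((2 * (P / 2) : Nat) : Int) := by rw [hT]; push_cast; ring
    _ = ((P : Nat) : Int) := by rw [hp2]
    _ = (m : Int) * ((m : Int) + 1) := by rw [hP]; push_cast; ring
  have hTle : T ≤ n := by
    have : P / 2 ≤ nn := by omega
    omega
  have hTlt : n - T < 1 + (m : Int) := by
    have : nn < P / 2 + m + 1 := by omega
    omega
  have hmP : m ≤ P / 2 := by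
    have h2m : 2*m ≤ P := by rw [hP]; nlinarith
    omega
  -- rewrite B's int computations first, then A by the loop lemmas
  rw [hmInt, hTInt]
  rw [sqrtWalkLoop1_eq m ((N-1).toNat + 1) n 1 T (by omega)
        (by rw [h2T]; push_cast; ring) hTle hTlt (by omega)]
  rw [sqrtWalkLoop2_eq (n - T).toNat _ (n - T) (1 + m) rfl (by omega)]
  -- rewrite B's ranges into List.range maps
  rw [PySem.List.pyRange_one 1 ((m : Int)+1), PySem.List.pyRange_one 0 (n - ((P / 2 : Nat) : Int))]
  have hmnat : (((m : Int) + 1 - 1).toNat) = m := by omega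
  have hrnat : ((n - ((P / 2 : Nat) : Int) - 0).toNat) = (n - T).toNat := by omega
  rw [hmnat, hrnat, List.map_map, List.map_map]
  simp only [List.cons_append]
  congr 1
  congr 1
  · apply List.map_congr_left
    intro a _
    simp [Function.comp]
    push_cast
    ring
  · apply List.map_congr_left
    intro a _
    simp [Function.comp]
    ring

-- ===== VERDICT (by name: the statement is the Claim_ definition above) =====
theorem sqrt_walk_spec : Claim_equal_sqrt_walk := by
  intro N _ hpre
  unfold Spec_sqrt_walk
  exact sqrt_walk_eq N hpre
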